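-- pv_equiv track=rewrite | github.com/RangelGasharov/python-basics | algorithms/leetcode_maximum_path_score_in_a_grid.py | max_path_score
-- ===== SOURCE A (Python) =====
-- from typing import List
--
-- def max_path_score(grid: List[List[int]], k: int) -> int:
--     m = len(grid)
--     n = len(grid[0])
--     negative = -10 ** 9
--
--     prev = [[negative] * (k + 1) for _ in range(n)]
--
--     for i in range(m):
--         curr = [[negative] * (k + 1) for _ in range(n)]
--
--         for j in range(n):
--             gain = grid[i][j]
--             need = 1 if gain > 0 else 0
--
--             limit = min(k, i + j)
--
--             if i == 0 and j == 0:
--                 curr[0][0] = 0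
--                 continue
--
--             for c in range(need, limit + 1):
--                 best = negative
--
--                 if i > 0 and prev[j][c - need] != negative:
--                     best = max(best, prev[j][c - need] + gain)
--
--                 if j > 0 and curr[j - 1][c - need] != negative:
--                     best = max(best, curr[j - 1][c - need] + gain)
--
--                 curr[j][c] = best
--
--         prev = curr
--
--     result = max(prev[n - 1])
--     return -1 if result < 0 else result
-- ===== SOURCE B (Python) =====
-- from typing import List
--
-- def max_path_score(grid: List[List[int]], k: int) -> int:
--     m = len(grid)
--     n = len(grid[0])
--     NEG = -10 ** 9
--     memo = {}
--
--     def f(i: int, j: int, c: int) -> int: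
--         # max score reaching (i, j) using exactly c positive cells (start not counted)
--         if c < 0:
--             return NEG
--         if i == 0 and j == 0:
--             return 0 if c == 0 else NEG
--         key = (i, j, c)
--         if key in memo:
--             return memo[key]
--         gain = grid[i][j]
--         need = 1 if gain > 0 else 0
--         best = NEG
--         if i > 0:
--             p = f(i - 1, j, c - need)
--             if p != NEG:
--                 best = max(best, p + gain)
--         if j > 0:
--             p = f(i, j - 1, c - need)
--             if p != NEG:
--                 best = max(best, p + gain)
--         memo[key] = best
--         return best
--
--     result = max(f(m - 1, n - 1, c) for c in range(k + 1))
--     return -1 if result < 0 else result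
-- ===== Notes on version B (the rewrite author's own statement) =====
-- stated objective: alternative
-- what changed: replaces A's bottom-up DP with rolling per-row 3D tables by a top-down memoized recursion f(i,j,c) on (row, column, exact number of positive cells used), with a dict memo and a final max over c in 0..k
import Mathlib
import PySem

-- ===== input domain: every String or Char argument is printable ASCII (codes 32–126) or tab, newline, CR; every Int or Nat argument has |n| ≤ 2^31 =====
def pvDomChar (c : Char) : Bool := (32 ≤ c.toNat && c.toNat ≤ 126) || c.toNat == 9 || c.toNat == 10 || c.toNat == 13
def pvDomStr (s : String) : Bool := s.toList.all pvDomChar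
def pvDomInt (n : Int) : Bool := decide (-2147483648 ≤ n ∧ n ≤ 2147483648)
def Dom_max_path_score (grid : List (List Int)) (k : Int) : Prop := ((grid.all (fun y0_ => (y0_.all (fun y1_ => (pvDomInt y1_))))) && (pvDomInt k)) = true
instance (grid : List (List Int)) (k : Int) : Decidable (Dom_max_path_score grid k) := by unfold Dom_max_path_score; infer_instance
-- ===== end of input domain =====

-- B replaces A's bottom-up rolling 3D table by a top-down recursion on
-- (row, column, exact count of positive cells used); equal return value, alternative decomposition.

-- ===== PORT A =====
-- the `negative` sentinel -10**9
def pvNeg : Int := -(10:Int)^9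

-- body of A's innermost `for c` loop: the computation of `best` for cell (i, j) at count c
def pvCellBest (prow crow : List Int) (gain need : Int) (i j : Nat) (c : Int) : Int :=
  let best0 : Int := pvNeg
  let best1 : Int :=
    if 0 < i ∧ prow.getD (c-need).toNat pvNeg ≠ pvNeg
    then max best0 (prow.getD (c-need).toNat pvNeg + gain) else best0
  if 0 < j ∧ crow.getD (c-need).toNat pvNeg ≠ pvNeg
  then max best1 (crow.getD (c-need).toNat pvNeg + gain) else best1

-- body of A's `for j` loop (one grid cell, filling curr[j][need..limit])
def pvRowStep (grid : List (List Int)) (k : Int) (prev : List (List Int)) (i : Nat)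
    (curr : List (List Int)) (j : Nat) : List (List Int) :=
  let gain := (grid.getD i []).getD j 0
  let need : Int := if 0 < gain then 1 else 0
  let limit : Int := min k ((i:Int)+(j:Int))
  if i = 0 ∧ j = 0 then curr.set 0 ((curr.getD 0 []).set 0 0)
  else (PySem.List.pyRange need (limit+1) 1).foldl
    (fun cur c => cur.set j ((cur.getD j []).set c.toNat
       (pvCellBest (prev.getD j []) (cur.getD (j-1) []) gain need i j c))) curr

-- body of A's `for i` loop (one grid row: fresh curr, then the j loop)
def pvIStep (grid : List (List Int)) (k : Int) (prev : List (List Int)) (i : Nat) : List (List Int) :=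
  let n := (grid.headD []).length
  (List.range n).foldl (pvRowStep grid k prev i) (List.replicate n (List.replicate (k+1).toNat pvNeg))

def max_path_score (grid : List (List Int)) (k : Int) : Int :=
  let m := grid.length
  let n := (grid.headD []).length
  let init : List (List Int) := List.replicate n (List.replicate (k+1).toNat pvNeg)
  let prev := (List.range m).foldl (pvIStep grid k) init
  let result := (PySem.List.max? (prev.getD (n-1) []) (fun y => y)).getD 0
  if result < 0 then -1 else result

-- ===== PORT B =====
-- B's recursion f(i, j, c): max score reaching (i, j) having used exactly c positive cells
-- (start cell not counted); the dict memo of Source B is pure caching and is dropped in the port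
def pvFB (grid : List (List Int)) (i j : Nat) (c : Int) : Int :=
  if c < 0 then pvNeg
  else if i = 0 ∧ j = 0 then (if c = 0 then 0 else pvNeg)
  else
    let gain := (grid.getD i []).getD j 0
    let need : Int := if 0 < gain then 1 else 0
    let best0 : Int := pvNeg
    let best1 : Int :=
      if _hi : 0 < i then
        let p := pvFB grid (i-1) j (c-need)
        if p ≠ pvNeg then max best0 (p+gain) else best0
      else best0
    if _hj : 0 < j then
      let p := pvFB grid i (j-1) (c-need)
      if p ≠ pvNeg then max best1 (p+gain) else best1
    else best1
termination_by i + j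
decreasing_by all_goals omega

def max_path_score_alt (grid : List (List Int)) (k : Int) : Int :=
  let m := grid.length
  let n := (grid.headD []).length
  let result := (PySem.List.max? ((PySem.List.pyRange 0 (k+1) 1).map (pvFB grid (m-1) (n-1)))
                  (fun y => y)).getD 0
  if result < 0 then -1 else result

-- ===== PRECONDITION & SPEC =====
-- Pre_ excludes exactly the inputs where Python A raises: an empty grid or empty first row
-- (IndexError/ValueError), a row shorter than the first row (IndexError), and k < 0 (IndexError).
def Pre_max_path_score (grid : List (List Int)) (k : Int) : Prop :=
  grid ≠ [] ∧ grid.headD [] ≠ [] ∧ (∀ row ∈ grid, (grid.headD []).length ≤ row.length) ∧ 0 ≤ k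
instance (grid : List (List Int)) (k : Int) : Decidable (Pre_max_path_score grid k) := by
  unfold Pre_max_path_score; infer_instance

def pvWitness_max_path_score : List (List Int) × Int := ([[1, -2], [3, 4]], 2)

def Spec_max_path_score (grid : List (List Int)) (k : Int) (out : Int) : Prop := out = max_path_score_alt grid k
instance (grid : List (List Int)) (k : Int) (out : Int) : Decidable (Spec_max_path_score grid k out) := by unfold Spec_max_path_score; infer_instance

-- ===== CLAIM (what is proved, stated in full; the proofs are below) =====
def Claim_equal_max_path_score : Prop := ∀ (grid : List (List Int)) (k : Int), Dom_max_path_score grid k → Pre_max_path_score grid k → Spec_max_path_score grid k (max_path_score grid k)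

-- ===== LEMMAS AND PROOFS =====

lemma pvFB_of_neg (grid : List (List Int)) (i j : Nat) (c : Int) (h : c < 0) :
    pvFB grid i j c = pvNeg := by
  rw [pvFB]; simp [h]

-- unreachable states: more positives than entered cells
lemma pvFB_of_big (grid : List (List Int)) :
    ∀ s (i j : Nat) (c : Int), i + j = s → (i:Int)+(j:Int) < c → pvFB grid i j c = pvNeg := by
  intro s
  induction s using Nat.strong_induction_on with
  | _ s ih =>
    intro i j c hs hc
    rw [pvFB]
    have hc0 : ¬ c < 0 := by omega
    simp only [hc0, if_false]
    set need : Int := if 0 < (grid.getD i []).getD j 0 then 1 else 0 with hneed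
    have hneedb : need = 0 ∨ need = 1 := by
      rw [hneed]; split <;> simp
    by_cases h00 : i = 0 ∧ j = 0
    · simp only [h00, and_self, if_true]
      have : ¬ c = 0 := by obtain ⟨h1,h2⟩ := h00; omega
      simp [this]
    · simp only [h00, if_false]
      have hup : ∀ (_ : 0 < i), pvFB grid (i-1) j (c-need) = pvNeg := by
        intro hi
        exact ih (i-1+j) (by omega) (i-1) j _ rfl (by omega)
      have hleft : ∀ (_ : 0 < j), pvFB grid i (j-1) (c-need) = pvNeg := by
        intro hj
        exact ih (i+(j-1)) (by omega) i (j-1) _ rfl (by omega)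
      by_cases hi : 0 < i <;> by_cases hj : 0 < j <;>
        first
          | (exfalso; omega)
          | simp [hup, hleft, hi, hj]

-- c - need < 0 makes both predecessor states unreachable
lemma pvFB_of_lt_need (grid : List (List Int)) (i j : Nat) (c : Int) (h00 : ¬(i = 0 ∧ j = 0))
    (hc : ¬ c < 0) (hcn : c - (if 0 < (grid.getD i []).getD j 0 then 1 else 0) < 0) :
    pvFB grid i j c = pvNeg := by
  rw [pvFB]
  simp only [hc, if_false, h00]
  set need : Int := if 0 < (grid.getD i []).getD j 0 then 1 else 0 with hneed
  have h1 : pvFB grid (i-1) j (c - need) = pvNeg := pvFB_of_neg _ _ _ _ hcn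
  have h2 : pvFB grid i (j-1) (c - need) = pvNeg := pvFB_of_neg _ _ _ _ hcn
  by_cases hi : 0 < i <;> by_cases hj : 0 < j <;> simp [hi, hj, h1, h2]

-- after the fold that writes v c at position c for each c in L, a read at t
lemma foldl_set_getD (v : Int → Int) :
    ∀ (L : List Int) (row : List Int) (t : Nat), (∀ c ∈ L, 0 ≤ c ∧ c.toNat < row.length) →
      (L.foldl (fun r c => r.set c.toNat (v c)) row).getD t pvNeg
        = if (t:Int) ∈ L then v t else row.getD t pvNeg := by
  intro L
  induction L with
  | nil => intro row t _; simp
  | cons c L ih =>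
    intro row t hb
    rw [List.foldl_cons, ih _ t (by intro c' hc'; have := hb c' (List.mem_cons_of_mem _ hc'); simpa using this)]
    by_cases hmem : (t:Int) ∈ L
    · simp [hmem]
    · simp only [hmem, if_false, List.mem_cons]
      obtain ⟨hc0, hclen⟩ := hb c List.mem_cons_self
      by_cases heq : (t:Int) = c
      · have htn : c.toNat = t := by omega
        subst htn
        rw [List.getD_eq_getElem?_getD, List.getElem?_set_self hclen]
        simp [heq]
      · have hne : c.toNat ≠ t := by omega
        rw [List.getD_eq_getElem?_getD, List.getElem?_set_ne hne, ← List.getD_eq_getElem?_getD]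
        simp [heq]

lemma foldl_set_length (v : Int → Int) :
    ∀ (L : List Int) (row : List Int),
      (L.foldl (fun r c => r.set c.toNat (v c)) row).length = row.length := by
  intro L
  induction L with
  | nil => intro row; rfl
  | cons c L ih => intro row; simp [List.foldl_cons, ih]

-- when j = 0 the `0 < j` branch is dead, so the value does not depend on crow
lemma pvCellBest_j0 (prow crow crow' : List Int) (gain need : Int) (i : Nat) (c : Int) :
    pvCellBest prow crow gain need i 0 c = pvCellBest prow crow' gain need i 0 c := by
  simp [pvCellBest]

-- the c-fold only rewrites row j, reading fixed data: it is a fold on that row alone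
lemma tfold_eq (prow : List Int) (gain need : Int) (i j : Nat) :
    ∀ (L : List Int) (T : List (List Int)), j < T.length →
      L.foldl (fun cur c => cur.set j ((cur.getD j []).set c.toNat
          (pvCellBest prow (cur.getD (j-1) []) gain need i j c))) T
      = T.set j (L.foldl (fun r c => r.set c.toNat
          (pvCellBest prow (T.getD (j-1) []) gain need i j c)) (T.getD j [])) := by
  intro L
  induction L with
  | nil =>
    intro T hT
    rw [List.foldl_nil, List.foldl_nil, List.getD_eq_getElem?_getD, List.getElem?_eq_getElem hT]
    simp [List.set_getElem_self]
  | cons c L ih =>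
    intro T hT
    rw [List.foldl_cons, List.foldl_cons]
    set row1 := (T.getD j []).set c.toNat (pvCellBest prow (T.getD (j-1) []) gain need i j c) with hrow1
    rw [ih (T.set j row1) (by simpa using hT)]
    have hgj : (T.set j row1).getD j [] = row1 := by
      rw [List.getD_eq_getElem?_getD, List.getElem?_set_self (by simpa using hT)]; rfl
    have hbv : ∀ (c' : Int),
        pvCellBest prow ((T.set j row1).getD (j-1) []) gain need i j c'
          = pvCellBest prow (T.getD (j-1) []) gain need i j c' := by
      intro c'
      by_cases hj0 : j = 0
      · subst hj0; exact pvCellBest_j0 _ _ _ _ _ _ _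
      · rw [List.getD_eq_getElem?_getD, List.getElem?_set_ne (by omega), ← List.getD_eq_getElem?_getD]
    rw [hgj, List.set_set]
    have hfe : (fun (r : List Int) (c' : Int) => r.set c'.toNat
          (pvCellBest prow ((T.set j row1).getD (j-1) []) gain need i j c'))
        = (fun (r : List Int) (c' : Int) => r.set c'.toNat
          (pvCellBest prow (T.getD (j-1) []) gain need i j c')) := by
      funext r c'; rw [hbv c']
    rw [hfe]

-- row j of table T holds the pvFB values for grid row i
def pvRowOK (grid : List (List Int)) (k : Int) (i : Nat) (T : List (List Int)) (j : Nat) : Prop :=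
  (T.getD j []).length = (k+1).toNat ∧
  ∀ c : Nat, c < (k+1).toNat → (T.getD j []).getD c pvNeg = pvFB grid i j (c:Int)

lemma foldl_set_table_length (g : List (List Int) → Int → List Int) (j : Nat) :
    ∀ (L : List Int) (T : List (List Int)),
      (L.foldl (fun cur c => cur.set j (g cur c)) T).length = T.length := by
  intro L
  induction L with
  | nil => intro T; rfl
  | cons c L ih => intro T; simp [List.foldl_cons, ih]

lemma rowStep_length (grid : List (List Int)) (k : Int) (prev : List (List Int)) (i : Nat)
    (curr : List (List Int)) (j : Nat) :
    (pvRowStep grid k prev i curr j).length = curr.length := by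
  rw [pvRowStep]
  split
  · simp
  · exact foldl_set_table_length
      (fun cur c => (cur.getD j []).set c.toNat
        (pvCellBest (prev.getD j []) (cur.getD (j-1) [])
          ((grid.getD i []).getD j 0) (if 0 < (grid.getD i []).getD j 0 then 1 else 0) i j c)) j _ curr

lemma rowStep_other (grid : List (List Int)) (k : Int) (prev : List (List Int)) (i : Nat)
    (curr : List (List Int)) (j : Nat) (hjlen : j < curr.length) (r : Nat) (hr : r ≠ j) :
    (pvRowStep grid k prev i curr j).getD r [] = curr.getD r [] := by
  rw [pvRowStep]
  split
  next h00 =>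
    obtain ⟨hi0, hj0⟩ := h00
    subst hj0
    rw [List.getD_eq_getElem?_getD, List.getElem?_set_ne (by omega), ← List.getD_eq_getElem?_getD]
  next =>
    rw [tfold_eq _ _ _ _ _ _ _ hjlen,
      List.getD_eq_getElem?_getD, List.getElem?_set_ne (by omega), ← List.getD_eq_getElem?_getD]

lemma rowStep_self (grid : List (List Int)) (k : Int) (prev : List (List Int)) (i : Nat)
    (curr : List (List Int)) (j : Nat)
    (hk : 0 ≤ k)
    (hprev : 0 < i → pvRowOK grid k (i-1) prev j)
    (hleft : 0 < j → pvRowOK grid k i curr (j-1))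
    (hcurj : curr.getD j [] = List.replicate (k+1).toNat pvNeg)
    (hjlen : j < curr.length) :
    pvRowOK grid k i (pvRowStep grid k prev i curr j) j := by
  have hK : 0 < (k+1).toNat := by omega
  rw [pvRowStep]
  split
  next h00 =>
    obtain ⟨hi0, hj0⟩ := h00
    subst hi0; subst hj0
    have hself : (curr.set 0 ((curr.getD 0 []).set 0 0)).getD 0 []
        = (List.replicate (k+1).toNat pvNeg).set 0 0 := by
      rw [List.getD_eq_getElem?_getD, List.getElem?_set_self hjlen, Option.getD_some, hcurj]
    constructor
    · rw [hself]; simp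
    · intro c hc
      rw [hself]
      by_cases hc0 : c = 0
      · subst hc0
        rw [List.getD_eq_getElem?_getD, List.getElem?_set_self (by simpa using hK)]
        rw [pvFB]; simp
      · rw [List.getD_eq_getElem?_getD, List.getElem?_set_ne (by omega),
          ← List.getD_eq_getElem?_getD, List.getD_replicate _ hc]
        rw [pvFB]
        have : ¬ ((c:Int) < 0) := by omega
        simp [this, hc0]
  next h00 =>
    rw [tfold_eq _ _ _ _ _ _ _ hjlen]
    set gain : Int := (grid.getD i []).getD j 0 with hgain
    set need : Int := if 0 < gain then 1 else 0 with hneedd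
    set limit : Int := min k ((i:Int)+(j:Int)) with hlimit
    have hneedb : need = 0 ∨ need = 1 := by rw [hneedd]; split <;> simp
    have hlim_le : limit ≤ k := min_le_left _ _
    set prow : List Int := prev.getD j [] with hprow
    set crow : List Int := curr.getD (j-1) [] with hcrow
    have hself : ∀ (R : List Int), (curr.set j R).getD j [] = R := by
      intro R
      rw [List.getD_eq_getElem?_getD, List.getElem?_set_self (by simpa using hjlen), Option.getD_some]
    rw [pvRowOK, hself, hcurj]
    have hbound : ∀ c ∈ PySem.List.pyRange need (limit+1) 1,
        0 ≤ c ∧ c.toNat < (List.replicate (k+1).toNat pvNeg).length := by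
      intro c hcmem
      rw [PySem.List.mem_pyRange_one] at hcmem
      constructor
      · omega
      · simp only [List.length_replicate]; omega
    constructor
    · rw [foldl_set_length]; simp
    · intro c hc
      rw [foldl_set_getD _ _ _ c hbound]
      have hck : (c:Int) ≤ k := by omega
      by_cases hmem : (c:Int) ∈ PySem.List.pyRange need (limit+1) 1
      · rw [if_pos hmem]
        rw [PySem.List.mem_pyRange_one] at hmem
        have hp : 0 < i → prow.getD ((c:Int)-need).toNat pvNeg = pvFB grid (i-1) j ((c:Int) - need) := by
          intro hi
          obtain ⟨_, hv⟩ := hprev hi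
          have ht : (((c:Int)-need).toNat : Nat) < (k+1).toNat := by omega
          have := hv ((c:Int)-need).toNat ht
          rw [← hprow] at this
          rw [this]
          congr 1
          omega
        have hq : 0 < j → crow.getD ((c:Int)-need).toNat pvNeg = pvFB grid i (j-1) ((c:Int) - need) := by
          intro hj
          obtain ⟨_, hv⟩ := hleft hj
          have ht : (((c:Int)-need).toNat : Nat) < (k+1).toNat := by omega
          have := hv ((c:Int)-need).toNat ht
          rw [← hcrow] at this
          rw [this]
          congr 1
          omega
        rw [pvFB]
        have hcneg : ¬ ((c:Int) < 0) := by omega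
        simp only [hcneg, if_false, h00, ← hgain, ← hneedd]
        simp only [List.getD_eq_getElem?_getD] at hp hq
        by_cases hi : 0 < i <;> by_cases hj : 0 < j <;>
          simp [pvCellBest, hi, hj, hp, hq]
      · rw [if_neg hmem, List.getD_replicate _ hc]
        rw [PySem.List.mem_pyRange_one] at hmem
        by_cases hsmall : (c:Int) < need
        · have hneed1 : need = 1 := by omega
          symm
          apply pvFB_of_lt_need grid i j (c:Int) h00 (by omega)
          rw [← hgain, ← hneedd]; omega
        · have hbig : (i:Int)+(j:Int) < (c:Int) := by omega
          exact (pvFB_of_big grid (i+j) i j (c:Int) rfl hbig).symm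

lemma pvRowOK_congr (grid : List (List Int)) (k : Int) (i : Nat) (T T' : List (List Int)) (j : Nat)
    (heq : T'.getD j [] = T.getD j []) (hok : pvRowOK grid k i T j) : pvRowOK grid k i T' j := by
  rw [pvRowOK] at hok ⊢
  rw [heq]
  exact hok

lemma jfold_inv (grid : List (List Int)) (k : Int) (prev : List (List Int)) (i : Nat)
    (hk : 0 ≤ k)
    (hprev : 0 < i → ∀ j < (grid.headD []).length, pvRowOK grid k (i-1) prev j) :
    ∀ jmax, jmax ≤ (grid.headD []).length →
      ((List.range jmax).foldl (pvRowStep grid k prev i)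
        (List.replicate (grid.headD []).length (List.replicate (k+1).toNat pvNeg))).length
          = (grid.headD []).length ∧
      (∀ j < jmax, pvRowOK grid k i ((List.range jmax).foldl (pvRowStep grid k prev i)
        (List.replicate (grid.headD []).length (List.replicate (k+1).toNat pvNeg))) j) ∧
      (∀ j, jmax ≤ j → j < (grid.headD []).length →
        ((List.range jmax).foldl (pvRowStep grid k prev i)
          (List.replicate (grid.headD []).length (List.replicate (k+1).toNat pvNeg))).getD j []
            = List.replicate (k+1).toNat pvNeg) := by
  intro jmax
  induction jmax with
  | zero =>
    intro _
    refine ⟨by simp, by omega, ?_⟩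
    intro j _ hj
    rw [List.range_zero, List.foldl_nil, List.getD_eq_getElem?_getD, List.getElem?_replicate,
      if_pos hj, Option.getD_some]
  | succ jmax ih =>
    intro hle
    obtain ⟨ihlen, ihok, ihfresh⟩ := ih (by omega)
    set T := (List.range jmax).foldl (pvRowStep grid k prev i)
      (List.replicate (grid.headD []).length (List.replicate (k+1).toNat pvNeg)) with hT
    have hstep : (List.range (jmax+1)).foldl (pvRowStep grid k prev i)
        (List.replicate (grid.headD []).length (List.replicate (k+1).toNat pvNeg))
        = pvRowStep grid k prev i T jmax := by
      rw [List.range_succ, List.foldl_append, List.foldl_cons, List.foldl_nil]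
    have hjlen : jmax < T.length := by omega
    rw [hstep]
    refine ⟨by rw [rowStep_length]; omega, ?_, ?_⟩
    · intro j hj
      by_cases hjj : j = jmax
      · subst hjj
        exact rowStep_self grid k prev i T j hk
          (fun hi => hprev hi j (by omega))
          (fun hjpos => ihok (j-1) (by omega))
          (ihfresh j (le_refl _) (by omega)) hjlen
      · exact pvRowOK_congr grid k i T _ j
          (rowStep_other grid k prev i T jmax hjlen j hjj) (ihok j (by omega))
    · intro j hj1 hj2
      rw [rowStep_other grid k prev i T jmax hjlen j (by omega)]
      exact ihfresh j (by omega) hj2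

lemma iStep_good (grid : List (List Int)) (k : Int) (prev : List (List Int)) (i : Nat)
    (hk : 0 ≤ k)
    (hprev : 0 < i → ∀ j < (grid.headD []).length, pvRowOK grid k (i-1) prev j) :
    (pvIStep grid k prev i).length = (grid.headD []).length ∧
    ∀ j < (grid.headD []).length, pvRowOK grid k i (pvIStep grid k prev i) j := by
  obtain ⟨h1, h2, _⟩ := jfold_inv grid k prev i hk hprev (grid.headD []).length (le_refl _)
  rw [pvIStep]
  exact ⟨h1, h2⟩

lemma outer_good (grid : List (List Int)) (k : Int) (hk : 0 ≤ k) :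
    ∀ i : Nat, ∀ j < (grid.headD []).length,
      pvRowOK grid k i ((List.range (i+1)).foldl (pvIStep grid k)
        (List.replicate (grid.headD []).length (List.replicate (k+1).toNat pvNeg))) j := by
  intro i
  induction i with
  | zero =>
    intro j hj
    rw [List.range_one, List.foldl_cons, List.foldl_nil]
    exact (iStep_good grid k _ 0 hk (by omega)).2 j hj
  | succ i ih =>
    intro j hj
    have hstep : (List.range (i+2)).foldl (pvIStep grid k)
        (List.replicate (grid.headD []).length (List.replicate (k+1).toNat pvNeg))
        = pvIStep grid k ((List.range (i+1)).foldl (pvIStep grid k)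
            (List.replicate (grid.headD []).length (List.replicate (k+1).toNat pvNeg))) (i+1) := by
      rw [List.range_succ, List.foldl_append, List.foldl_cons, List.foldl_nil]
    rw [hstep]
    exact (iStep_good grid k _ (i+1) hk (fun _ => ih)).2 j hj

theorem max_path_score_spec : Claim_equal_max_path_score := by
  intro grid k _hdom hpre
  obtain ⟨hne, hrow0, _hlen, hk⟩ := hpre
  have hm0 : 0 < grid.length := List.length_pos_of_ne_nil hne
  have hn0 : 0 < (grid.headD []).length := List.length_pos_of_ne_nil hrow0
  show max_path_score grid k = max_path_score_alt grid k
  rw [max_path_score, max_path_score_alt]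
  have hmr : List.range grid.length = List.range ((grid.length - 1) + 1) := by
    congr 1; omega
  rw [hmr]
  obtain ⟨hRlen, hRval⟩ := outer_good grid k hk (grid.length - 1)
    ((grid.headD []).length - 1) (by omega)
  set T := (List.range ((grid.length - 1) + 1)).foldl (pvIStep grid k)
    (List.replicate (grid.headD []).length (List.replicate (k+1).toNat pvNeg)) with hT
  have hrows : T.getD ((grid.headD []).length - 1) []
      = (PySem.List.pyRange 0 (k+1) 1).map (pvFB grid (grid.length - 1) ((grid.headD []).length - 1)) := by
    apply List.ext_getElem
    · rw [hRlen, List.length_map, PySem.List.length_pyRange_one]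
      omega
    · intro c h1 h2
      have hcK : c < (k+1).toNat := by rw [hRlen] at h1; exact h1
      have hv := hRval c hcK
      rw [List.getD_eq_getElem?_getD, List.getElem?_eq_getElem h1, Option.getD_some] at hv
      rw [hv, List.getElem_map, PySem.List.getElem_pyRange_one]
      congr 1
      omega
  rw [hrows]
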